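-- pv_equiv track=rewrite | github.com/GoldenRC/program_makro | zlecenie_makro/main.py | rem_prd_id
-- ===== SOURCE A (Python) =====
-- def rem_prd_id(split_text, prd_id):
--     # Usuń elementy zawierające nazwe produktu
--     el_to_rem = []
--     prd_id = prd_id.lower()
--     starting_prd_id = prd_id
--     for i, line in enumerate(split_text):
--         line = line.lower()
--         if line in prd_id:
--             if prd_id == starting_prd_id and line[0] != prd_id[0]:
--                 pass
--             else:
--                 el_to_rem.append(i)
--                 prd_id = prd_id.replace(line,'')
--                 if prd_id == '':
--                     break
--
--     for i in reversed(el_to_rem):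
--         split_text.pop(i)
--
--     return split_text
-- ===== SOURCE B (Python) =====
-- def rem_prd_id(split_text, prd_id):
--     # One forward pass building the kept list directly (no index collection / reverse pops);
--     # mutates split_text in place via slice assignment, like A's pops. Same return value.
--     prd_id = prd_id.lower()
--     starting = prd_id
--     kept = []
--     n = len(split_text)
--     i = 0
--     while i < n and prd_id != '':
--         line = split_text[i]
--         low = line.lower()
--         if low in prd_id and not (prd_id == starting and low[0] != prd_id[0]):
--             prd_id = prd_id.replace(low, '')
--         else:
--             kept.append(line)
--         i += 1
--     kept.extend(split_text[i:])
--     split_text[:] = kept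
--     return split_text
-- ===== Notes on version B (the rewrite author's own statement) =====
-- stated objective: simpler
-- what changed: A collects match indices in one loop and then reverse-pops them from the list in a second loop; B is a single forward pass that builds the kept list directly (with the break expressed as copying the remaining tail) and writes it back with slice assignment.
-- outside the precondition, e.g. on rem_prd_id(['ab', ''], 'abc'): A returns [], B returns []
import Mathlib
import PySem

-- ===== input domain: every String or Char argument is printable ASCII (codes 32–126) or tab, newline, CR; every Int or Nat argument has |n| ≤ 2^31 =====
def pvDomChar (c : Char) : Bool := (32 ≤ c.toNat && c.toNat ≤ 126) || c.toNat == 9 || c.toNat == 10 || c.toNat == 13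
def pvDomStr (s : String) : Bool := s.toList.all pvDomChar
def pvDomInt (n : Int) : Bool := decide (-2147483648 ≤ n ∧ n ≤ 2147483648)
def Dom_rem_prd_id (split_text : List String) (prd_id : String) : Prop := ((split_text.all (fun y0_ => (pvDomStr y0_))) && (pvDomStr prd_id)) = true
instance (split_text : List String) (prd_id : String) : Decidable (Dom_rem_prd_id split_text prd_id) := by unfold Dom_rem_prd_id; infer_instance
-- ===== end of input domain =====

-- B fuses A's two loops (index collection + reverse pops) into one forward pass building the
-- kept list; return-value equivalence (both also mutate the Python list the same way in the end).

-- ===== PORT A =====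
-- line[0] / prd_id[0] raise IndexError in Python on the empty string; Pre_ excludes those
-- inputs, so the '?' defaults below are never the computed value on admitted inputs.
def pvHeadNeA (low prd : String) : Bool :=
  (PySem.Str.pyGet? low 0).getD '?' != (PySem.Str.pyGet? prd 0).getD '?'

-- first loop of A: collect indices to remove (with the break when prd_id becomes '')
def pvCollectA : List String → Nat → String → String → List Nat → List Nat
  | [], _, _, _, acc => acc
  | line :: rest, i, prd, start, acc =>
    let low := PySem.Str.lower line
    if PySem.Str.isIn low prd then
      if prd == start && pvHeadNeA low prd then
        pvCollectA rest (i+1) prd start acc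
      else
        let prd' := PySem.Str.replace prd low ""
        if prd' == "" then acc ++ [i]
        else pvCollectA rest (i+1) prd' start (acc ++ [i])
    else pvCollectA rest (i+1) prd start acc

-- second loop of A: for i in reversed(el_to_rem): split_text.pop(i)
def pvPopsA : List String → List Nat → List String
  | xs, [] => xs
  | xs, i :: rest =>
    match PySem.List.pop? xs (i : Int) with
    | some (_, ys) => pvPopsA ys rest
    | none => pvPopsA xs rest   -- Python would raise; unreachable: collected indices are in range

def rem_prd_id (split_text : List String) (prd_id : String) : List String :=
  let prd := PySem.Str.lower prd_id
  let el_to_rem := pvCollectA split_text 0 prd prd []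
  pvPopsA split_text el_to_rem.reverse

-- ===== PORT B =====
-- the while loop of Source B: stops when prd = '' (then keeps the remaining tail unchanged)
def pvKeepB : List String → String → String → List String → List String
  | [], _, _, kept => kept
  | line :: rs, prd, start, kept =>
    if prd == "" then kept ++ (line :: rs)
    else
      let low := PySem.Str.lower line
      if PySem.Str.isIn low prd && !(prd == start && pvHeadNeA low prd) then
        pvKeepB rs (PySem.Str.replace prd low "") start kept
      else
        pvKeepB rs prd start (kept ++ [line])

def rem_prd_id_alt (split_text : List String) (prd_id : String) : List String :=
  let prd := PySem.Str.lower prd_id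
  pvKeepB split_text prd prd []

-- ===== PRECONDITION & SPEC =====
-- Pre_ excludes lists containing an empty string: on those A raises IndexError at line[0]
-- whenever the empty line occurs before any removal (B agrees with A on the remaining ones,
-- so the exclusion is slightly wider than the crashes, see the cite in the claim).
def Pre_rem_prd_id (split_text : List String) (prd_id : String) : Prop :=
  "" ∉ split_text
instance (split_text : List String) (prd_id : String) : Decidable (Pre_rem_prd_id split_text prd_id) := by
  unfold Pre_rem_prd_id; infer_instance

def pvWitness_rem_prd_id : List String × String := (["Abc", "zz", "bc"], "aBCd")

def Spec_rem_prd_id (split_text : List String) (prd_id : String) (out : List String) : Prop := out = rem_prd_id_alt split_text prd_id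
instance (split_text : List String) (prd_id : String) (out : List String) : Decidable (Spec_rem_prd_id split_text prd_id out) := by unfold Spec_rem_prd_id; infer_instance

-- ===== CLAIM (what is proved, stated in full; the proofs are below) =====
def Claim_equal_rem_prd_id : Prop := ∀ (split_text : List String) (prd_id : String), Dom_rem_prd_id split_text prd_id → Pre_rem_prd_id split_text prd_id → Spec_rem_prd_id split_text prd_id (rem_prd_id split_text prd_id)

-- ===== LEMMAS AND PROOFS =====

-- reference "kept" function: what one pass over the list keeps (drop on a real match,
-- on break keep the whole tail)
def pvKeepSpec : List String → String → String → List String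
  | [], _, _ => []
  | line :: rs, prd, start =>
    let low := PySem.Str.lower line
    if PySem.Str.isIn low prd && !(prd == start && pvHeadNeA low prd) then
      if PySem.Str.replace prd low "" == "" then rs
      else pvKeepSpec rs (PySem.Str.replace prd low "") start
    else line :: pvKeepSpec rs prd start

theorem pvPop_at_length (pref : List String) (line : String) (k : List String) :
    PySem.List.pop? (pref ++ line :: k) ((pref.length : Nat) : Int) = some (line, pref ++ k) := by
  have hlt : pref.length < (pref ++ line :: k).length := by simp
  rw [PySem.List.pop?_natCast _ _ hlt]
  have hg : (pref ++ line :: k)[pref.length]'hlt = line := by simp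
  have he : (pref ++ line :: k).eraseIdx pref.length = pref ++ k := by
    rw [List.eraseIdx_append_of_length_le (le_refl _)]
    simp
  rw [hg, he]

theorem pvCollect_pops (rest : List String) (prd start : String) (pref : List String)
    (acc : List Nat) :
    pvPopsA (pref ++ rest) (pvCollectA rest pref.length prd start acc).reverse
      = pvPopsA (pref ++ pvKeepSpec rest prd start) acc.reverse := by
  induction rest generalizing prd pref acc with
  | nil => simp [pvCollectA, pvKeepSpec]
  | cons line rs ih =>
      simp only [pvCollectA, pvKeepSpec]
      by_cases h1 : PySem.Str.isIn (PySem.Str.lower line) prd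
      · by_cases h2 : (prd == start && pvHeadNeA (PySem.Str.lower line) prd) = true
        · -- pass branch: keep the element
          simp only [h1, h2, if_true, Bool.not_true, Bool.and_false, Bool.false_eq_true,
            if_false]
          have := ih prd (pref ++ [line]) acc
          simpa using this
        · -- real match
          rw [Bool.not_eq_true] at h2
          by_cases h3 : (PySem.Str.replace prd (PySem.Str.lower line) "" == "") = true
          · -- break: pop this index, keep the rest
            simp only [h1, h2, h3, if_true, Bool.false_eq_true, if_false, Bool.not_false,
              Bool.and_true, List.reverse_append, List.reverse_singleton,
              List.singleton_append, pvPopsA, pvPop_at_length]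
          · -- drop and continue with shrunken prd
            rw [Bool.not_eq_true] at h3
            simp only [h1, h2, h3, if_true, Bool.false_eq_true, if_false, Bool.not_false,
              Bool.and_true]
            have := ih (PySem.Str.replace prd (PySem.Str.lower line) "") (pref ++ [line])
              (acc ++ [pref.length])
            simp only [List.length_append, List.length_singleton, List.append_assoc,
              List.singleton_append] at this
            rw [this, List.reverse_append, List.reverse_singleton, List.singleton_append,
              pvPopsA, pvPop_at_length]
      · -- no substring match: keep
        rw [Bool.not_eq_true] at h1
        simp only [h1, Bool.false_eq_true, if_false, Bool.false_and]
        have := ih prd (pref ++ [line]) acc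
        simpa using this

theorem pvLower_ne_empty {s : String} (h : s ≠ "") : PySem.Str.lower s ≠ "" := by
  intro hc
  apply h
  have : (PySem.Str.lower s).toList = [] := by rw [hc]; rfl
  rw [PySem.Str.toList_lower] at this
  have : s.toList = [] := by
    cases hs : s.toList with
    | nil => rfl
    | cons c cs => rw [hs] at this; simp [PySem.Chars.lower] at this
  exact String.toList_eq_nil_iff.mp this

theorem pvIsIn_empty_right {sub : String} (h : sub ≠ "") :
    PySem.Str.isIn sub "" = false := by
  rw [Bool.eq_false_iff]
  intro hc
  rw [PySem.Str.isIn_iff_infix] at hc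
  have : sub.toList = [] := by simpa using hc.eq_of_length_le (by simp)
  apply h
  exact String.toList_eq_nil_iff.mp this

theorem pvKeepSpec_empty (rest : List String) (start : String)
    (hne : ∀ l ∈ rest, l ≠ "") : pvKeepSpec rest "" start = rest := by
  induction rest with
  | nil => rfl
  | cons line rs ih =>
      have h1 : PySem.Str.isIn (PySem.Str.lower line) "" = false :=
        pvIsIn_empty_right (pvLower_ne_empty (hne line (by simp)))
      simp only [pvKeepSpec, h1, Bool.false_and, Bool.false_eq_true, if_false]
      rw [ih (fun l hl => hne l (by simp [hl]))]
theorem pvKeepB_eq (rest : List String) (prd start : String) (kept : List String)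
    (hne : ∀ l ∈ rest, l ≠ "") :
    pvKeepB rest prd start kept = kept ++ pvKeepSpec rest prd start := by
  induction rest generalizing prd kept with
  | nil => simp [pvKeepB, pvKeepSpec]
  | cons line rs ih =>
      by_cases hp : (prd == "") = true
      · have hp' : prd = "" := by simpa using hp
        subst hp'
        simp only [pvKeepB, if_pos hp]
        rw [pvKeepSpec_empty _ start hne]
      · simp only [pvKeepB, pvKeepSpec, hp]
        by_cases hc : (PySem.Str.isIn (PySem.Str.lower line) prd
            && !(prd == start && pvHeadNeA (PySem.Str.lower line) prd)) = true
        · simp only [hc]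
          by_cases h3 : (PySem.Str.replace prd (PySem.Str.lower line) "" == "") = true
          · have h3' : PySem.Str.replace prd (PySem.Str.lower line) "" = "" := by simpa using h3
            rw [h3']
            cases rs with
            | nil => simp [pvKeepB]
            | cons y ys => simp [pvKeepB]
          · simp only [h3]
            exact ih _ _ (fun l hl => hne l (by simp [hl]))
        · simp only [hc]
          rw [ih prd (kept ++ [line]) (fun l hl => hne l (List.mem_cons_of_mem _ hl))]
          simp

-- ===== VERDICT (by name: the statement is the Claim_ definition above) =====
theorem rem_prd_id_spec : Claim_equal_rem_prd_id := by
  intro split_text prd_id _hdom hpre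
  unfold Spec_rem_prd_id rem_prd_id rem_prd_id_alt
  have hne : ∀ l ∈ split_text, l ≠ "" := by
    intro l hl he
    exact hpre (he ▸ hl)
  have h1 := pvCollect_pops split_text (PySem.Str.lower prd_id) (PySem.Str.lower prd_id) [] []
  simp only [List.nil_append, List.length_nil, List.reverse_nil, pvPopsA] at h1
  rw [h1, pvKeepB_eq _ _ _ _ hne, List.nil_append]
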